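-- pv_equiv track=rewrite | github.com/wlsdnjs0707/Practice_Programmers | level2/level2_42626.py | solution
-- ===== SOURCE A (Python) =====
-- def solution(scoville, K):
--     answer = 0
--     a = 0
--     b = 0
--     count = 0
--     flag = 1
--
--     while (flag >= 1):
--
--         if len(scoville) == 1:
--             count = -1
--             break
--
--         flag = 0
--
--         scoville.sort()
--         a = scoville.pop(0)
--         b = scoville.pop(0)
--
--         scoville.append(a + (b * 2))
--         count += 1
--
--         for i in scoville:
--             if i < K:
--                 flag = 1
--
--     return count
-- ===== SOURCE B (Python) =====
-- def solution(scoville, K):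
--     # Two sorted queues: the sorted input (q1) and merged values (q2, produced
--     # in non-decreasing order), scanned by indices; min of the two fronts is the
--     # global minimum, so no re-sorting (and no heap) is needed.
--     # Unlike A, this does not mutate the caller's list, and returns 0 when every
--     # food is already at least K (A always performs one merge first).
--     q1 = sorted(scoville)
--     q2 = []
--     i = 0
--     j = 0
--     count = 0
--     while True:
--         r1 = len(q1) - i
--         r2 = len(q2) - j
--         if r1 == 0 and r2 == 0:
--             return count
--         if r1 > 0 and (r2 == 0 or q1[i] <= q2[j]):
--             m = q1[i]
--         else:
--             m = q2[j]
--         if m >= K: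
--             return count
--         if r1 + r2 < 2:
--             return -1
--         if r1 > 0 and (r2 == 0 or q1[i] <= q2[j]):
--             x = q1[i]; i += 1
--         else:
--             x = q2[j]; j += 1
--         if i < len(q1) and (j >= len(q2) or q1[i] <= q2[j]):
--             y = q1[i]; i += 1
--         else:
--             y = q2[j]; j += 1
--         q2.append(x + 2 * y)
--         count += 1
-- ===== Notes on version B (the rewrite author's own statement) =====
-- stated objective: faster
-- what changed: A re-sorts the whole list on every merge (O(n^2 log n)); B sorts once and scans two sorted queues (the sorted input and the merged values, which come out in non-decreasing order), taking each minimum from the two fronts in O(1).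
-- intended difference: On non-empty inputs whose elements are all already >= K, A still performs a forced first merge and returns 1 (or -1 for a singleton list) because its loop flag starts at 1; B returns the intended 0, since no mixing is needed. — e.g. on solution([1, 2], 0): A returns 1, B returns 0
import Mathlib
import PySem

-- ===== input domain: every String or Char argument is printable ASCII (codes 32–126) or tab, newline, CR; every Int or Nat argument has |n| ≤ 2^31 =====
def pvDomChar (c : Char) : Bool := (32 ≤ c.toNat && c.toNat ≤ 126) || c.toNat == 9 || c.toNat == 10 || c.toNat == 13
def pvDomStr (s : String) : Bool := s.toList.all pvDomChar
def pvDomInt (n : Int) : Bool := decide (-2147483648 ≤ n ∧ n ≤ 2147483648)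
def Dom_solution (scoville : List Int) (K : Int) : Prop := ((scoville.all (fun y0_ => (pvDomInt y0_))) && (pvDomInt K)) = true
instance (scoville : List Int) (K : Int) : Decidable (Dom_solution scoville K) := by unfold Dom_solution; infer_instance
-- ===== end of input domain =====

-- B replaces A's sort-inside-the-loop with one initial sort and two sorted queues
-- scanned from the front (objective: faster, asymptotically). A mutates its list
-- argument in place (sort/pop/append); B does not — the equivalence proved here is
-- about the return value only.

-- ===== PORT A =====
-- body of A's while loop: check len==1; sort; pop two; append a + b*2; recompute flag.
-- The loop removes one element per pass, so fuel = initial length always suffices;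
-- the fuel-0 branch is only reachable for scoville = [] (outside Pre_, Python raises).
def solutionLoop (K : Int) (fuel : Nat) (sc : List Int) (count : Int) : Int :=
  match fuel with
  | 0 => 0
  | fuel' + 1 =>
    if sc.length = 1 then -1
    else
      match PySem.List.sorted sc (fun x => x) false with
      | a :: b :: rest =>
        let sc' := rest ++ [a + b * 2]
        if sc'.any (fun i => decide (i < K)) then solutionLoop K fuel' sc' (count + 1)
        else count + 1
      | _ => 0  -- only reachable for sc = [], where Python's pop(0) raises IndexError (outside Pre_)

def solution (scoville : List Int) (K : Int) : Int :=
  solutionLoop K scoville.length scoville 0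

-- ===== PORT B =====
-- Source B scans the two sorted arrays by indices i and j; the live suffixes q1[i:], q2[j:]
-- are the lists r1, r2 here.  "take the smaller front" (the comparison Source B repeats) as
-- a helper:
def popMinFront (r1 r2 : List Int) : Int × List Int × List Int :=
  match r1, r2 with
  | x :: t1, [] => (x, t1, [])
  | [], y :: t2 => (y, [], t2)
  | x :: t1, y :: t2 => if x ≤ y then (x, t1, y :: t2) else (y, x :: t1, t2)
  | [], [] => (0, [], [])  -- never consulted: callers check emptiness first

-- each pass merges two elements into one, so fuel = initial length always suffices
def solAltLoop (K : Int) (fuel : Nat) (r1 r2 : List Int) (count : Int) : Int :=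
  match fuel with
  | 0 => count
  | fuel' + 1 =>
    if r1.length = 0 ∧ r2.length = 0 then count
    else
      let p := popMinFront r1 r2
      if K ≤ p.1 then count
      else if r1.length + r2.length < 2 then -1
      else
        let q := popMinFront p.2.1 p.2.2
        solAltLoop K fuel' q.2.1 (q.2.2 ++ [p.1 + 2 * q.1]) (count + 1)

def solution_alt (scoville : List Int) (K : Int) : Int :=
  solAltLoop K scoville.length (PySem.List.sorted scoville (fun x => x) false) [] 0

-- ===== PRECONDITION & SPEC =====
-- Pre_ excludes only the empty list, on which A's scoville.pop(0) raises IndexError.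
def Pre_solution (scoville : List Int) (K : Int) : Prop := scoville ≠ []
instance (scoville : List Int) (K : Int) : Decidable (Pre_solution scoville K) := by
  unfold Pre_solution; infer_instance

def pvWitness_solution : List Int × Int := ([2, 5, 1], 7)

-- On non-empty inputs whose elements are all already >= K, A still performs a forced first
-- merge and returns 1 (or -1 for a singleton list) because its loop flag starts at 1;
-- B returns the intended 0, since no mixing is needed.
def D_solution (scoville : List Int) (K : Int) : Prop :=
  scoville ≠ [] ∧ ∀ x ∈ scoville, K ≤ x
instance (scoville : List Int) (K : Int) : Decidable (D_solution scoville K) := by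
  unfold D_solution; infer_instance

def Spec_solution (scoville : List Int) (K : Int) (out : Int) : Prop :=
  ¬ D_solution scoville K → out = solution_alt scoville K
instance (scoville : List Int) (K : Int) (out : Int) : Decidable (Spec_solution scoville K out) := by
  unfold Spec_solution; infer_instance

def pvDiffWitness_solution : List Int × Int := ([1, 2], 0)
def pvDiffWitnessOut_solution : Int × Int := (1, 0)

-- ===== CLAIM (what is proved, stated in full; the proofs are below) =====
def Claim_unchanged_solution : Prop := ∀ (scoville : List Int) (K : Int), Dom_solution scoville K → Pre_solution scoville K → Spec_solution scoville K (solution scoville K)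
def Claim_changed_solution : Prop := Dom_solution (pvDiffWitness_solution.1) (pvDiffWitness_solution.2) ∧ Pre_solution (pvDiffWitness_solution.1) (pvDiffWitness_solution.2) ∧ D_solution (pvDiffWitness_solution.1) (pvDiffWitness_solution.2) ∧ solution (pvDiffWitness_solution.1) (pvDiffWitness_solution.2) = pvDiffWitnessOut_solution.1 ∧ solution_alt (pvDiffWitness_solution.1) (pvDiffWitness_solution.2) = pvDiffWitnessOut_solution.2 ∧ pvDiffWitnessOut_solution.1 ≠ pvDiffWitnessOut_solution.2
def Claim_exact_solution : Prop := ∀ (scoville : List Int) (K : Int), Dom_solution scoville K → Pre_solution scoville K → D_solution scoville K → solution scoville K ≠ solution_alt scoville K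

-- ===== LEMMAS AND PROOFS =====

-- the canonical greedy on the multiset: stop when nothing is below K, else merge the
-- two smallest (one fuel unit per merge, like both loops above)
def canonLoop (K : Int) (fuel : Nat) (s : List Int) (c : Int) : Int :=
  match fuel with
  | 0 => c
  | fuel' + 1 =>
    if s.any (fun i => decide (i < K)) then
      if s.length ≤ 1 then -1
      else
        match PySem.List.sorted s (fun x => x) false with
        | a :: b :: rest => canonLoop K fuel' (rest ++ [a + b * 2]) (c + 1)
        | _ => -1
    else c

theorem canonLoop_perm (K : Int) (f : Nat) (s s' : List Int) (c : Int) (hp : s.Perm s') :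
    canonLoop K f s c = canonLoop K f s' c := by
  cases f with
  | zero => rfl
  | succ f =>
    simp only [canonLoop]
    rw [show s.any (fun i => decide (i < K)) = s'.any (fun i => decide (i < K)) from hp.any_eq]
    rw [hp.length_eq]
    rw [PySem.List.sorted_eq_sorted_of_perm s s' (fun x => x) (fun a b h => h) hp]

theorem canonLoop_done (K : Int) (f : Nat) (s : List Int) (c : Int)
    (h : s.any (fun i => decide (i < K)) = false) :
    canonLoop K f s c = c := by
  cases f with
  | zero => rfl
  | succ f =>
    simp only [canonLoop]
    rw [if_neg (by simp [h])]

theorem sorted_shape2 (s : List Int) (h : 2 ≤ s.length) :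
    ∃ a b rest, PySem.List.sorted s (fun x => x) false = a :: b :: rest := by
  have hl : (PySem.List.sorted s (fun x => x) false).length = s.length :=
    PySem.List.length_sorted ..
  cases e : PySem.List.sorted s (fun x => x) false with
  | nil => rw [e] at hl; simp at hl; omega
  | cons a t =>
    cases t with
    | nil => rw [e] at hl; simp at hl; omega
    | cons b rest => exact ⟨a, b, rest, rfl⟩

theorem loopA_eq_canon (K : Int) : ∀ (f : Nat) (s : List Int) (c : Int), s.length ≤ f →
    s.any (fun i => decide (i < K)) = true →
    solutionLoop K f s c = canonLoop K f s c := by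
  intro f
  induction f with
  | zero =>
    intro s c hn hany
    cases s with
    | nil => simp at hany
    | cons x t => simp at hn
  | succ f ih =>
    intro s c hn hany
    have hne : s ≠ [] := by intro e; subst e; simp at hany
    have hpos : 0 < s.length := List.length_pos_of_ne_nil hne
    simp only [solutionLoop, canonLoop]
    rw [if_pos hany]
    by_cases h1 : s.length = 1
    · rw [if_pos h1, if_pos (by omega)]
    · rw [if_neg h1, if_neg (by omega : ¬ s.length ≤ 1)]
      have h2 : 2 ≤ s.length := by omega
      obtain ⟨a, b, rest, e⟩ := sorted_shape2 s h2
      have hl : (PySem.List.sorted s (fun x => x) false).length = s.length :=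
        PySem.List.length_sorted ..
      rw [e] at hl
      simp at hl
      rw [e]
      simp only
      by_cases h3 : (rest ++ [a + b * 2]).any (fun i => decide (i < K)) = true
      · rw [if_pos h3]
        exact ih _ _ (by simp; omega) h3
      · rw [if_neg h3]
        exact (canonLoop_done K f _ (c + 1) (Bool.eq_false_iff.mpr h3)).symm

theorem loopA_result (K : Int) : ∀ (f : Nat) (s : List Int) (c : Int), s.length ≤ f → s ≠ [] →
    solutionLoop K f s c = -1 ∨ c + 1 ≤ solutionLoop K f s c := by
  intro f
  induction f with
  | zero =>
    intro s c hn hne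
    cases s with
    | nil => exact absurd rfl hne
    | cons x t => simp at hn
  | succ f ih =>
    intro s c hn hne
    have hpos : 0 < s.length := List.length_pos_of_ne_nil hne
    simp only [solutionLoop]
    by_cases h1 : s.length = 1
    · rw [if_pos h1]; left; rfl
    · rw [if_neg h1]
      have h2 : 2 ≤ s.length := by omega
      obtain ⟨a, b, rest, e⟩ := sorted_shape2 s h2
      have hl : (PySem.List.sorted s (fun x => x) false).length = s.length :=
        PySem.List.length_sorted ..
      rw [e] at hl
      simp at hl
      rw [e]
      simp only
      by_cases h3 : (rest ++ [a + b * 2]).any (fun i => decide (i < K)) = true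
      · rw [if_pos h3]
        rcases ih (rest ++ [a + b * 2]) (c + 1) (by simp; omega) (by simp) with h | h
        · left; exact h
        · right; omega
      · rw [if_neg h3]
        right; omega

theorem popMinFront_spec (r1 r2 : List Int)
    (h : ¬(r1.length = 0 ∧ r2.length = 0))
    (h1 : r1.Pairwise (· ≤ ·)) (h2 : r2.Pairwise (· ≤ ·)) :
    (r1 ++ r2).Perm ((popMinFront r1 r2).1 :: ((popMinFront r1 r2).2.1 ++ (popMinFront r1 r2).2.2)) ∧
    (∀ z ∈ (popMinFront r1 r2).2.1 ++ (popMinFront r1 r2).2.2, (popMinFront r1 r2).1 ≤ z) ∧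
    (popMinFront r1 r2).2.1.Pairwise (· ≤ ·) ∧
    (popMinFront r1 r2).2.2.Pairwise (· ≤ ·) ∧
    (((popMinFront r1 r2).2.1 = r1 ∧ r2 = (popMinFront r1 r2).1 :: (popMinFront r1 r2).2.2) ∨
     ((popMinFront r1 r2).2.2 = r2 ∧ r1 = (popMinFront r1 r2).1 :: (popMinFront r1 r2).2.1)) := by
  match r1, r2 with
  | [], [] => simp at h
  | x :: t1, [] =>
    obtain ⟨hx, ht1⟩ := List.pairwise_cons.mp h1
    refine ⟨by simp [popMinFront], ?_, ?_, ?_, ?_⟩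
    · simp only [popMinFront]
      intro z hz
      simp at hz
      exact hx z hz
    · simpa [popMinFront] using ht1
    · simp [popMinFront]
    · right; exact ⟨rfl, rfl⟩
  | [], y :: t2 =>
    obtain ⟨hy, ht2⟩ := List.pairwise_cons.mp h2
    refine ⟨by simp [popMinFront], ?_, ?_, ?_, ?_⟩
    · simp only [popMinFront]
      intro z hz
      simp at hz
      exact hy z hz
    · simp [popMinFront]
    · simpa [popMinFront] using ht2
    · left; exact ⟨rfl, rfl⟩
  | x :: t1, y :: t2 =>
    obtain ⟨hx, ht1⟩ := List.pairwise_cons.mp h1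
    obtain ⟨hy, ht2⟩ := List.pairwise_cons.mp h2
    by_cases hxy : x ≤ y
    · refine ⟨by simp [popMinFront, hxy], ?_, ?_, ?_, ?_⟩
      · simp only [popMinFront, if_pos hxy]
        intro z hz
        rcases List.mem_append.mp hz with hz | hz
        · exact hx z hz
        · rcases List.mem_cons.mp hz with rfl | hz
          · exact hxy
          · exact le_trans hxy (hy z hz)
      · simpa [popMinFront, hxy] using ht1
      · simpa [popMinFront, hxy] using h2
      · right; simp [popMinFront, hxy]
    · have hyx : y ≤ x := by omega
      refine ⟨?_, ?_, ?_, ?_, ?_⟩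
      · simp only [popMinFront, if_neg hxy]
        exact List.perm_middle
      · simp only [popMinFront, if_neg hxy]
        intro z hz
        rcases List.mem_append.mp hz with hz | hz
        · rcases List.mem_cons.mp hz with rfl | hz
          · exact hyx
          · exact le_trans hyx (hx z hz)
        · exact hy z hz
      · simpa [popMinFront, hxy] using h1
      · simpa [popMinFront, hxy] using ht2
      · left; simp [popMinFront, hxy]

theorem sorted_le_getLast : ∀ (l : List Int), l.Pairwise (· ≤ ·) →
    ∀ M, l.getLast? = some M → ∀ a ∈ l, a ≤ M := by
  intro l
  induction l with
  | nil => intro _ M hM; simp at hM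
  | cons x t ih =>
    intro hp M hM a ha
    cases t with
    | nil =>
      simp at hM ha
      omega
    | cons b s =>
      rw [List.getLast?_cons_cons] at hM
      have hMmem : M ∈ b :: s := List.mem_of_getLast? hM
      rcases List.mem_cons.mp ha with rfl | ha'
      · exact (List.pairwise_cons.mp hp).1 M hMmem
      · exact ih (List.pairwise_cons.mp hp).2 M hM a ha'

-- invariant of B's merged queue: its last element a+b*2 came from a merge whose larger
-- input b is below everything that is still unconsumed before it
def InvLast (r1 r2 : List Int) : Prop :=
  ∀ m, r2.getLast? = some m →
    ∃ a b, m = a + b * 2 ∧ a ≤ b ∧ ∀ z ∈ r1 ++ r2.dropLast, b ≤ z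

theorem loopB_eq_canon (K : Int) : ∀ (f : Nat) (r1 r2 : List Int) (c : Int),
    r1.length + r2.length ≤ f →
    r1.Pairwise (· ≤ ·) → r2.Pairwise (· ≤ ·) → InvLast r1 r2 →
    solAltLoop K f r1 r2 c = canonLoop K f (r1 ++ r2) c := by
  intro f
  induction f with
  | zero =>
    intro r1 r2 c hn h1 h2 hinv
    rfl
  | succ f ih =>
    intro r1 r2 c hn h1 h2 hinv
    by_cases h0 : r1.length = 0 ∧ r2.length = 0
    · have e1 : r1 = [] := by cases r1 <;> simp_all
      have e2 : r2 = [] := by cases r2 <;> simp_all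
      subst e1; subst e2
      simp [solAltLoop, canonLoop]
    · have spec1 := popMinFront_spec r1 r2 h0 h1 h2
      rcases hP : popMinFront r1 r2 with ⟨m, s1, s2⟩
      rw [hP] at spec1
      dsimp only at spec1
      obtain ⟨perm1, min1, hs1, hs2, tails1⟩ := spec1
      by_cases hK : K ≤ m
      · have hanyf : (r1 ++ r2).any (fun i => decide (i < K)) = false := by
          apply List.any_eq_false.mpr
          intro z hz
          have hz' := perm1.mem_iff.mp hz
          rcases List.mem_cons.mp hz' with rfl | hz'
          · simp; omega
          · have := min1 z hz'
            simp; omega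
        simp only [solAltLoop]
        rw [if_neg h0]
        simp only [hP]
        rw [if_pos hK]
        exact (canonLoop_done K (f + 1) _ c hanyf).symm
      · have hmem_m : m ∈ r1 ++ r2 := perm1.mem_iff.mpr (List.mem_cons_self ..)
        have hanyt : (r1 ++ r2).any (fun i => decide (i < K)) = true :=
          List.any_eq_true.mpr ⟨m, hmem_m, by simp; omega⟩
        by_cases hlt : r1.length + r2.length < 2
        · have hlen1 : (r1 ++ r2).length ≤ 1 := by simp; omega
          simp only [solAltLoop, canonLoop]
          rw [if_pos hanyt, if_pos hlen1, if_neg h0]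
          simp only [hP]
          rw [if_neg hK, if_pos hlt]
        · -- the real merge step
          have hs0 : ¬(s1.length = 0 ∧ s2.length = 0) := by
            have hle := perm1.length_eq
            simp at hle
            omega
          have spec2 := popMinFront_spec s1 s2 hs0 hs1 hs2
          rcases hQ : popMinFront s1 s2 with ⟨y, u1, u2⟩
          rw [hQ] at spec2
          dsimp only at spec2
          obtain ⟨perm2, min2, hu1, hu2, tails2⟩ := spec2
          have hmy : m ≤ y := min1 y (perm2.mem_iff.mpr (List.mem_cons_self ..))
          have hfacts : u2 ≠ [] →
              u2.getLast? = r2.getLast? ∧ m ∈ r1 ++ r2.dropLast ∧ y ∈ r1 ++ r2.dropLast := by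
            intro hu2ne
            obtain ⟨w, u2', rfl⟩ : ∃ w u2', u2 = w :: u2' := by
              cases u2 with
              | nil => exact absurd rfl hu2ne
              | cons w u2' => exact ⟨w, u2', rfl⟩
            rcases tails1 with ⟨e1, e2⟩ | ⟨e1, e2⟩ <;> rcases tails2 with ⟨f1, f2⟩ | ⟨f1, f2⟩
            · -- m from r2, y from s2 : r2 = m :: y :: w :: u2'
              subst f2; subst e2
              refine ⟨?_, ?_, ?_⟩
              · rw [List.getLast?_cons_cons, List.getLast?_cons_cons]
              · simp
              · simp
            · -- m from r2, y from s1 : r2 = m :: w :: u2', y is the head of s1 = r1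
              subst f1; subst e2
              refine ⟨?_, ?_, ?_⟩
              · rw [List.getLast?_cons_cons]
              · simp
              · have hy : y ∈ r1 := by rw [← e1, f2]; exact List.mem_cons_self ..
                exact List.mem_append.mpr (Or.inl hy)
            · -- m from r1, y from s2 = r2 : r2 = y :: w :: u2'
              subst e1; subst f2
              refine ⟨?_, ?_, ?_⟩
              · rw [List.getLast?_cons_cons]
              · have hm : m ∈ r1 := by rw [e2]; exact List.mem_cons_self ..
                exact List.mem_append.mpr (Or.inl hm)
              · simp
            · -- m, y both from r1 : u2 = s2 = r2
              subst f1; subst e1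
              refine ⟨rfl, ?_, ?_⟩
              · have hm : m ∈ r1 := by rw [e2]; exact List.mem_cons_self ..
                exact List.mem_append.mpr (Or.inl hm)
              · have hy : y ∈ r1 := by
                  rw [e2, f2]
                  exact List.mem_cons.mpr (Or.inr (List.mem_cons_self ..))
                exact List.mem_append.mpr (Or.inl hy)
          have hval : ∀ a ∈ u2, a ≤ m + 2 * y := by
            intro a ha
            have hu2ne : u2 ≠ [] := by intro e; rw [e] at ha; simp at ha
            obtain ⟨hgl, hm, hy⟩ := hfacts hu2ne
            obtain ⟨M, hM⟩ : ∃ M, u2.getLast? = some M := by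
              cases hM2 : u2.getLast? with
              | none => exact absurd (List.getLast?_eq_none_iff.mp hM2) hu2ne
              | some M => exact ⟨M, rfl⟩
            obtain ⟨A, B, hMe, hAB, hB⟩ := hinv M (by rw [← hgl]; exact hM)
            have haM : a ≤ M := sorted_le_getLast u2 hu2 M hM a ha
            have hBm : B ≤ m := hB m hm
            have hBy : B ≤ y := hB y hy
            omega
          have hnewSorted : (u2 ++ [m + 2 * y]).Pairwise (· ≤ ·) := by
            apply List.pairwise_append.mpr
            refine ⟨hu2, by simp, ?_⟩
            intro a ha b hb
            simp at hb
            subst hb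
            exact hval a ha
          have hnewInv : InvLast u1 (u2 ++ [m + 2 * y]) := by
            intro M hM
            rw [List.getLast?_concat] at hM
            have hMv : M = m + 2 * y := by injection hM with h; omega
            refine ⟨m, y, by omega, hmy, ?_⟩
            rw [List.dropLast_concat]
            exact min2
          have hlen3 : u1.length + (u2 ++ [m + 2 * y]).length ≤ f := by
            have l1 := perm1.length_eq
            have l2 := perm2.length_eq
            simp at l1 l2 ⊢
            omega
          have hIH := ih u1 (u2 ++ [m + 2 * y]) (c + 1) hlen3 hu1 hnewSorted hnewInv
          have psort_perm : (PySem.List.sorted (u1 ++ u2) (fun x => x) false).Perm (u1 ++ u2) :=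
            PySem.List.sorted_perm ..
          have hsorted_eq : PySem.List.sorted (r1 ++ r2) (fun x => x) false
              = m :: y :: PySem.List.sorted (u1 ++ u2) (fun x => x) false := by
            apply PySem.List.sorted_id_eq_of_perm_of_pairwise
            · exact ((psort_perm.cons y).cons m).trans (((perm2.symm).cons m).trans perm1.symm)
            · refine List.pairwise_cons.mpr ⟨?_, List.pairwise_cons.mpr ⟨?_, ?_⟩⟩
              · intro z hz
                rcases List.mem_cons.mp hz with rfl | hz
                · exact hmy
                · have hz2 : z ∈ u1 ++ u2 := (PySem.List.mem_sorted ..).mp hz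
                  exact min1 z (perm2.mem_iff.mpr (List.mem_cons.mpr (Or.inr hz2)))
              · intro z hz
                exact min2 z ((PySem.List.mem_sorted ..).mp hz)
              · simpa using PySem.List.sorted_pairwise (u1 ++ u2) (fun x => x)
          simp only [solAltLoop]
          rw [if_neg h0]
          simp only [hP, hQ]
          rw [if_neg hK, if_neg hlt]
          rw [hIH]
          simp only [canonLoop]
          rw [if_pos hanyt]
          have hlen2 : ¬ (r1 ++ r2).length ≤ 1 := by simp; omega
          rw [if_neg hlen2]
          rw [hsorted_eq]
          simp only
          have hvv : m + y * 2 = m + 2 * y := by ring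
          rw [hvv]
          apply canonLoop_perm
          have hpp : ((u1 ++ u2) ++ [m + 2 * y]).Perm
              ((PySem.List.sorted (u1 ++ u2) (fun x => x) false) ++ [m + 2 * y]) :=
            List.Perm.append_right _ psort_perm.symm
          rw [← List.append_assoc]
          exact hpp

-- ===== VERDICT (by name: the statement is the Claim_ definition above) =====
theorem solution_spec : Claim_unchanged_solution := by
  intro sc K hdom hpre
  unfold Spec_solution
  intro hnd
  unfold D_solution at hnd
  unfold Pre_solution at hpre
  obtain ⟨x, hx, hxK⟩ : ∃ x ∈ sc, x < K := by
    by_contra hno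
    apply hnd
    refine ⟨hpre, fun x hx => ?_⟩
    by_contra hlt
    exact hno ⟨x, hx, by omega⟩
  have hany : sc.any (fun i => decide (i < K)) = true :=
    List.any_eq_true.mpr ⟨x, hx, by simp; omega⟩
  have hA : solution sc K = canonLoop K sc.length sc 0 :=
    loopA_eq_canon K sc.length sc 0 le_rfl hany
  have hperm : (PySem.List.sorted sc (fun x => x) false).Perm sc := PySem.List.sorted_perm ..
  have hlen : (PySem.List.sorted sc (fun x => x) false).length = sc.length :=
    PySem.List.length_sorted ..
  have hB : solution_alt sc K
      = canonLoop K sc.length (PySem.List.sorted sc (fun x => x) false ++ []) 0 :=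
    loopB_eq_canon K sc.length _ [] 0 (by simp [hlen])
      (by simpa using PySem.List.sorted_pairwise sc (fun x => x)) List.Pairwise.nil
      (fun m hm => by simp at hm)
  rw [hA, hB, List.append_nil]
  exact canonLoop_perm K sc.length _ _ 0 hperm.symm

theorem solution_changed : Claim_changed_solution := by
  unfold Claim_changed_solution
  decide

theorem solution_tight : Claim_exact_solution := by
  intro sc K hdom hpre hd
  unfold D_solution at hd
  unfold Pre_solution at hpre
  obtain ⟨hne, hall⟩ := hd
  have hpsne : PySem.List.sorted sc (fun x => x) false ≠ [] := by
    rw [Ne, PySem.List.sorted_eq_nil_iff]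
    exact hne
  obtain ⟨m, t, e⟩ : ∃ m t, PySem.List.sorted sc (fun x => x) false = m :: t := by
    cases h : PySem.List.sorted sc (fun x => x) false with
    | nil => exact absurd h hpsne
    | cons m t => exact ⟨m, t, rfl⟩
  have hmem : m ∈ sc := (PySem.List.mem_sorted ..).mp (e ▸ List.mem_cons_self ..)
  have hKm : K ≤ m := hall m hmem
  obtain ⟨fl, hfl⟩ : ∃ fl, sc.length = fl + 1 :=
    ⟨sc.length - 1, by have := List.length_pos_of_ne_nil hne; omega⟩
  have hBalt : solution_alt sc K = 0 := by
    rw [solution_alt, hfl, e]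
    simp [solAltLoop, popMinFront, hKm]
  have hA := loopA_result K sc.length sc 0 le_rfl hne
  rw [hBalt]
  show solutionLoop K sc.length sc 0 ≠ 0
  rcases hA with h | h <;> omega
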